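-- pv_equiv track=rewrite | github.com/TechforgoodCAST/beehive-data-etl | grant.py | get_multi_national
-- ===== SOURCE A (Python) =====
-- def get_multi_national(char = None):
--     """
--     Work out if the charity operates across more than one country
--     """
--     if char is None:
--         return None
--     multi_national = False
--     country_count = 0
--     uk = False
--     for i in char.get("areaOfOperation", []):
--         if i["aooType"]=="D":
--             country_count += 1
--         elif i["aooType"]=="E":
--             country_count += 2 # assume if it's a continent that it's more than one country
--         else:
--             uk = True
--     if uk:
--         country_count += 1
--     if country_count > 1:
--         multi_national = True
--     return multi_national
-- ===== SOURCE B (Python) =====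
-- def get_multi_national(char = None):
--     """
--     Work out if the charity operates across more than one country.
--     Case analysis instead of a weighted counter: any continent ('E') means
--     multi-national outright; otherwise it is multi-national iff there are two
--     or more countries ('D'), or one country plus any other (UK) area.
--     """
--     if char is None:
--         return None
--     types = [i["aooType"] for i in char.get("areaOfOperation", [])]
--     if "E" in types:
--         return True
--     d = types.count("D")
--     return d > 1 or (d == 1 and any(t != "D" for t in types))
-- ===== Notes on version B (the rewrite author's own statement) =====
-- stated objective: simpler
-- what changed: B replaces A's weighted running counter (+1/+2 with a uk flag, compared to a threshold) by a direct case analysis: extract the list of aooType values, return True immediately if any continent 'E' is present, else decide by the count of 'D' (>=2, or ==1 together with any non-'D' entry).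
import Mathlib
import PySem

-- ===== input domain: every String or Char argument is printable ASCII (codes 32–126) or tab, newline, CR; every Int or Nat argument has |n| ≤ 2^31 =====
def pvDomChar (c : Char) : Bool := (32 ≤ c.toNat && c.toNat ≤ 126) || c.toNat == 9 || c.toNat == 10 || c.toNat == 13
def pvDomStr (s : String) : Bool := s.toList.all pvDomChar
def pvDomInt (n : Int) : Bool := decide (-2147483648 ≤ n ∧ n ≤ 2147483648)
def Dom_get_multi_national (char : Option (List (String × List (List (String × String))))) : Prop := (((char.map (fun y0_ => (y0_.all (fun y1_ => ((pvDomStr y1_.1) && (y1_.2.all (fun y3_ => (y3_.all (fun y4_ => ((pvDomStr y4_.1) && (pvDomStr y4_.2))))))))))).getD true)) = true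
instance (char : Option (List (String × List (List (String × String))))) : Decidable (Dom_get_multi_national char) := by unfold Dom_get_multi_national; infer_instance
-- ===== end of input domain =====

-- B replaces A's weighted running counter with a direct case analysis over the list of
-- aooType values (continent present / count of countries), same O(n) cost.


-- shared dict-access helpers (char.get("areaOfOperation", []) and i["aooType"]; first-match lookup)
def pvAoo (c : List (String × List (List (String × String)))) : List (List (String × String)) :=
  match c.find? (fun p => p.1 == "areaOfOperation") with
  | some p => p.2
  | none => []

def pvType? (i : List (String × String)) : Option String :=
  (i.find? (fun p => p.1 == "aooType")).map (·.2)

-- i["aooType"] raises KeyError when absent; Pre_ excludes that, the default "" is never reached there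
def pvTypeD (i : List (String × String)) : String := (pvType? i).getD ""

-- ===== PORT A =====
def get_multi_national (char : Option (List (String × List (List (String × String))))) : Option Bool :=
  match char with
  | none => none
  | some c =>
    let st := (pvAoo c).foldl
      (fun (s : Int × Bool) i =>
        if pvTypeD i == "D" then (s.1 + 1, s.2)
        else if pvTypeD i == "E" then (s.1 + 2, s.2)
        else (s.1, true)) (0, false)
    let country_count := if st.2 then st.1 + 1 else st.1
    some (decide (country_count > 1))

-- ===== PORT B =====
def get_multi_national_alt (char : Option (List (String × List (List (String × String))))) : Option Bool :=
  match char with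
  | none => none
  | some c =>
    let types := (pvAoo c).map pvTypeD
    if types.contains "E" then some true
    else
      let d : Int := types.count "D"
      some (decide (d > 1) || (d == 1 && types.any (fun t => t != "D")))

-- ===== PRECONDITION & SPEC =====
-- Pre_ excludes exactly the inputs on which A raises KeyError: an areaOfOperation entry without an "aooType" key.
def Pre_get_multi_national (char : Option (List (String × List (List (String × String))))) : Prop :=
  ∀ c, char = some c → ∀ i ∈ pvAoo c, (pvType? i).isSome
instance (char : Option (List (String × List (List (String × String))))) : Decidable (Pre_get_multi_national char) := by unfold Pre_get_multi_national; infer_instance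

def pvWitness_get_multi_national : (Option (List (String × List (List (String × String))))) :=
  some [("areaOfOperation", [[("aooType", "D")], [("aooType", "E")]])]

def Spec_get_multi_national (char : Option (List (String × List (List (String × String))))) (out : Option Bool) : Prop := out = get_multi_national_alt char
instance (char : Option (List (String × List (List (String × String))))) (out : Option Bool) : Decidable (Spec_get_multi_national char out) := by unfold Spec_get_multi_national; infer_instance

-- ===== CLAIM (what is proved, stated in full; the proofs are below) =====
def Claim_equal_get_multi_national : Prop := ∀ (char : Option (List (String × List (List (String × String))))), Dom_get_multi_national char → Pre_get_multi_national char → Spec_get_multi_national char (get_multi_national char)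

-- ===== LEMMAS AND PROOFS =====

-- A's accumulating loop, characterised by the counts of "D" and "E" and the presence of any other type
theorem pv_foldA (l : List (List (String × String))) : ∀ (cc : Int) (uk : Bool),
    l.foldl (fun (s : Int × Bool) i =>
        if pvTypeD i == "D" then (s.1 + 1, s.2)
        else if pvTypeD i == "E" then (s.1 + 2, s.2)
        else (s.1, true)) (cc, uk)
    = (cc + ((l.map pvTypeD).count "D" : Int) + 2 * ((l.map pvTypeD).count "E" : Int),
       uk || (l.map pvTypeD).any (fun t => !(t == "D" || t == "E"))) := by
  induction l with
  | nil => simp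
  | cons i l ih =>
    intro cc uk
    rw [List.foldl_cons]
    by_cases hD : pvTypeD i = "D"
    · rw [if_pos (by simp [hD]), ih]
      refine Prod.ext ?_ ?_
      · simp [hD]; ring
      · simp [hD]
    · by_cases hE : pvTypeD i = "E"
      · rw [if_neg (by simp [hD]), if_pos (by simp [hE]), ih]
        refine Prod.ext ?_ ?_
        · simp [hE]; ring
        · simp [hE]
      · rw [if_neg (by simp [hD]), if_neg (by simp [hE]), ih]
        refine Prod.ext ?_ ?_
        · simp [hD, hE]
        · simp [hD, hE]

-- ===== VERDICT (by name: the statement is the Claim_ definition above) =====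
theorem get_multi_national_spec : Claim_equal_get_multi_national := by
  intro char _dom _pre
  unfold Spec_get_multi_national
  cases char with
  | none => rfl
  | some c =>
    simp only [get_multi_national, get_multi_national_alt]
    rw [pv_foldA (pvAoo c) 0 false]
    set ts := (pvAoo c).map pvTypeD with hts
    set cd : Int := (ts.count "D" : Int) with hcdd
    set ce : Int := (ts.count "E" : Int) with hced
    have hcd : 0 ≤ cd := by positivity
    by_cases hE : "E" ∈ ts
    · have hce : 1 ≤ ce := by
        rw [hced]
        exact_mod_cast Nat.one_le_iff_ne_zero.mpr (by simpa [List.count_eq_zero] using hE)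
      have hcon : ts.contains "E" = true := by simpa using hE
      rw [if_pos hcon]
      cases h : ts.any (fun t => !(t == "D" || t == "E")) <;>
        simp only [h, Bool.false_or, zero_add, if_true, if_false, Option.some.injEq,
          decide_eq_true_eq] <;> omega
    · have hce : ce = 0 := by simp [hced, List.count_eq_zero.mpr hE]
      have hcon : ts.contains "E" = false := by simpa using hE
      have hany : ts.any (fun t => !(t == "D" || t == "E")) = ts.any (fun t => t != "D") := by
        rcases h : ts.any (fun t => t != "D")
        · simp only [List.any_eq_false] at h ⊢
          intro x hx
          have := h x hx
          simp at this
          simp [this]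
        · simp only [List.any_eq_true] at h ⊢
          obtain ⟨x, hx, hp⟩ := h
          refine ⟨x, hx, ?_⟩
          have hxe : x ≠ "E" := fun hh => hE (hh ▸ hx)
          simp at hp; simp [hp, hxe]
      rw [hany]
      cases h : ts.any (fun t => t != "D")
      · simp [h, hce, hE]
      · simp only [h, hcon, hce, Bool.false_or, zero_add, mul_zero, add_zero,
          Bool.false_eq_true, if_false, if_true, Bool.and_true, Option.some.injEq]
        by_cases h1 : cd = 1
        · simp [h1]
        · have hb : (cd == 1) = false := by simpa using h1
          rw [hb, Bool.or_false, decide_eq_decide]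
          omega
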